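-- pv_equiv track=rewrite | github.com/jk-jung/problem-solving | codewars/6kyu/6_Binary Coded Decimal.py | to_bcd
-- ===== SOURCE A (Python) =====
-- def to_bcd(n):
--     if not n: return '0000'
--     t = ''
--     if n < 0:
--         n = -n
--         t = '-'
--     r = []
--     while n:
--         x = n % 10
--         r.append(('0'* 10 + bin(x)[2:])[-4:])
--         n //= 10
--     return t + ' '.join(r[::-1])
-- ===== SOURCE B (Python) =====
-- def to_bcd(n):
--     sign = '-' if n < 0 else ''
--     return sign + ' '.join(format(ord(c) - 48, '04b') for c in str(abs(n)))
-- ===== Notes on version B (the rewrite author's own statement) =====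
-- stated objective: idiomatic
-- what changed: Replaced the mod/floordiv digit loop with reversal by a direct map over the decimal string str(abs(n)), formatting each digit with format(..., '04b') and joining most-significant-first, sign prepended; no special zero guard is needed.
import Mathlib
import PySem

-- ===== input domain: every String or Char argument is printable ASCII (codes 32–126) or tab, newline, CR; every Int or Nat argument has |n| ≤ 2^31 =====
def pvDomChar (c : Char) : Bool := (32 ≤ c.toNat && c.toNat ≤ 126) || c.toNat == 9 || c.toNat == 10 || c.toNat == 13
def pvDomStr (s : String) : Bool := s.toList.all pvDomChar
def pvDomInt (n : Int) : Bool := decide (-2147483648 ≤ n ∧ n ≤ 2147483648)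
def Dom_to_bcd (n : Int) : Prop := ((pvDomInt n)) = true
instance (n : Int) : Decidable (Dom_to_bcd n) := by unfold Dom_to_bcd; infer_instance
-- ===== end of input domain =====

-- B maps each digit of the decimal string of |n| to its zero-padded 4-bit binary and joins;
-- A extracts digits by % 10 // 10 and reverses.  Objective: idiomatic; return values proved equal.

-- ===== PORT A =====
-- ('0' * 10 + bin(x)[2:])[-4:]
def pvAChunk (x : Int) : List Char :=
  PySem.List.slice
    (List.replicate 10 '0' ++ PySem.List.slice (PySem.Int.toBinChars0b x) (some 2) none)
    (some (-4)) none

-- the `while n:` loop; at every call site n > 0, so `n ≤ 0 → r` is only a totality guard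
def pvALoop (n : Int) (r : List (List Char)) : List (List Char) :=
  if _h : n ≤ 0 then r
  else pvALoop (PySem.Int.floordiv n 10) (r ++ [pvAChunk (PySem.Int.mod n 10)])
termination_by n.toNat
decreasing_by
  have h10 : PySem.Int.floordiv n 10 = n / 10 := PySem.Int.floordiv_eq_ediv_of_pos (by omega)
  rw [h10]; omega

def to_bcd (n : Int) : String :=
  if n = 0 then "0000" else
  let t : List Char := if n < 0 then ['-'] else []
  let m : Int := if n < 0 then -n else n
  String.mk (t ++ PySem.Chars.join [' '] ((pvALoop m []).reverse))

-- ===== PORT B =====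
-- format(d, '04b') for 0 ≤ d: binary digits zero-padded on the left to width 4
def pvBChunk (d : Int) : List Char :=
  let bits := PySem.Int.toBinChars d
  List.replicate (4 - bits.length) '0' ++ bits

def to_bcd_alt (n : Int) : String :=
  let sign : List Char := if n < 0 then ['-'] else []
  String.mk (sign ++ PySem.Chars.join [' ']
    ((PySem.Int.toChars |n|).map (fun c => pvBChunk ((c.toNat : Int) - 48))))

-- ===== PRECONDITION & SPEC =====
def Spec_to_bcd (n : Int) (out : String) : Prop := out = to_bcd_alt n
instance (n : Int) (out : String) : Decidable (Spec_to_bcd n out) := by unfold Spec_to_bcd; infer_instance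

-- ===== CLAIM (what is proved, stated in full; the proofs are below) =====
def Claim_equal_to_bcd : Prop := ∀ (n : Int), Dom_to_bcd n → Spec_to_bcd n (to_bcd n)

-- ===== LEMMAS AND PROOFS =====

lemma pv_core_acc (f : Nat) : ∀ (n : Nat) (ds : List Char),
    Nat.toDigitsCore 10 f n ds = Nat.toDigitsCore 10 f n [] ++ ds := by
  induction f with
  | zero => intro n ds; simp [Nat.toDigitsCore]
  | succ f ih =>
    intro n ds
    simp only [Nat.toDigitsCore]
    by_cases h : n / 10 = 0
    · simp [h]
    · simp only [h, if_false]
      rw [ih (n / 10) ((n % 10).digitChar :: ds), ih (n / 10) [(n % 10).digitChar]]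
      simp

lemma pv_core_fuel : ∀ (n f₁ f₂ : Nat) (ds : List Char), n < f₁ → n < f₂ →
    Nat.toDigitsCore 10 f₁ n ds = Nat.toDigitsCore 10 f₂ n ds := by
  intro n
  induction n using Nat.strong_induction_on with
  | _ n ih =>
    intro f₁ f₂ ds h1 h2
    obtain ⟨g₁, rfl⟩ : ∃ g, f₁ = g + 1 := ⟨f₁ - 1, by omega⟩
    obtain ⟨g₂, rfl⟩ : ∃ g, f₂ = g + 1 := ⟨f₂ - 1, by omega⟩
    simp only [Nat.toDigitsCore]
    by_cases h : n / 10 = 0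
    · simp [h]
    · simp only [h, if_false]
      exact ih (n / 10) (by omega) g₁ g₂ _ (by omega) (by omega)

lemma pv_toDigits_rec (m : Nat) (h : 10 ≤ m) :
    Nat.toDigits 10 m = Nat.toDigits 10 (m / 10) ++ [(m % 10).digitChar] := by
  have hm : m / 10 ≠ 0 := by omega
  simp only [Nat.toDigits, Nat.toDigitsCore, hm, if_false]
  rw [pv_core_fuel (m / 10) m (m / 10 + 1) [(m % 10).digitChar] (by omega) (by omega)]
  exact pv_core_acc _ _ _

lemma pv_chunk_eq (d : Nat) (hd : d < 10) :
    pvAChunk (d : Int) = pvBChunk ((Nat.digitChar d).toNat - 48) := by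
  interval_cases d <;> decide

lemma pv_fd (m : Nat) : PySem.Int.floordiv (m : Int) 10 = ((m / 10 : Nat) : Int) := by
  rw [PySem.Int.floordiv_eq_ediv_of_pos (by omega)]; omega

lemma pv_md (m : Nat) : PySem.Int.mod (m : Int) 10 = ((m % 10 : Nat) : Int) := by
  rw [PySem.Int.mod_eq_emod_of_pos (by omega)]; omega

lemma pv_step (m : Nat) (h : m ≠ 0) (r : List (List Char)) :
    pvALoop (m : Int) r = pvALoop ((m / 10 : Nat) : Int) (r ++ [pvAChunk ((m % 10 : Nat) : Int)]) := by
  rw [pvALoop, dif_neg (show ¬((m : Int) ≤ 0) by omega), pv_fd, pv_md]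

lemma pv_loop_acc : ∀ (m : Nat) (r : List (List Char)),
    pvALoop (m : Int) r = r ++ pvALoop (m : Int) [] := by
  intro m
  induction m using Nat.strong_induction_on with
  | _ m ih =>
    intro r
    by_cases h : m = 0
    · subst h; simp [pvALoop]
    · rw [pv_step m h r, pv_step m h [],
          ih (m / 10) (by omega) (r ++ [pvAChunk ((m % 10 : Nat) : Int)]),
          ih (m / 10) (by omega) ([] ++ [pvAChunk ((m % 10 : Nat) : Int)])]
      simp

lemma pv_main (m : Nat) (hm : 0 < m) :
    (pvALoop (m : Int) []).reverse
      = (Nat.toDigits 10 m).map (fun c => pvBChunk ((c.toNat : Int) - 48)) := by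
  induction m using Nat.strong_induction_on with
  | _ m ih =>
    rw [pv_step m (by omega) []]
    by_cases h : m < 10
    · have h0 : m / 10 = 0 := by omega
      have hmod : m % 10 = m := by omega
      rw [h0, hmod]
      simp only [Nat.cast_zero, List.nil_append]
      rw [pvALoop]
      simp only [le_refl, dif_pos]
      have : Nat.toDigits 10 m = [Nat.digitChar m] := by
        simp [Nat.toDigits, Nat.toDigitsCore, h0, hmod]
      rw [this]
      simp [pv_chunk_eq m h]
    · rw [pv_loop_acc (m / 10) ([] ++ [pvAChunk ((m % 10 : Nat) : Int)])]
      rw [pv_toDigits_rec m (by omega), pv_chunk_eq (m % 10) (by omega)]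
      simp only [List.nil_append, List.map_append, List.map_cons, List.map_nil,
        List.reverse_append]
      rw [ih (m / 10) (by omega) (by omega)]
      simp

-- ===== VERDICT (by name: the statement is the Claim_ definition above) =====
lemma pv_toChars_cast (k : Nat) : PySem.Int.toChars (k : Int) = Nat.toDigits 10 k := by
  simp only [PySem.Int.toChars]
  rw [if_neg (show ¬(((k : Nat) : Int) < 0) by omega), Int.toNat_natCast]

theorem to_bcd_spec : Claim_equal_to_bcd := by
  intro n _
  unfold Spec_to_bcd to_bcd to_bcd_alt
  by_cases h0 : n = 0
  · subst h0; decide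
  · simp only [h0, if_false]
    by_cases hneg : n < 0
    · obtain ⟨k, hk, rfl⟩ : ∃ k : Nat, 0 < k ∧ n = -(k : Int) :=
        ⟨(-n).toNat, by omega, by omega⟩
      simp only [hneg, if_true, neg_neg, abs_neg, Nat.abs_cast]
      rw [pv_main k hk, pv_toChars_cast]
    · obtain ⟨k, hk, rfl⟩ : ∃ k : Nat, 0 < k ∧ n = (k : Int) :=
        ⟨n.toNat, by omega, by omega⟩
      simp only [hneg, if_false, Nat.abs_cast]
      rw [pv_main k hk, pv_toChars_cast]
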